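-- pv_equiv track=rewrite | github.com/adorsk/abjad | abjad/tools/sequencetools/negate_absolute_value_of_sequence_elements_at_indices.py | negate_absolute_value_of_sequence_elements_at_indices
-- ===== SOURCE A (Python) =====
-- def negate_absolute_value_of_sequence_elements_at_indices(sequence, indices):
--     '''Negate the absolute value of `sequence` elements at `indices`:
--
--     ::
--
--         >>> sequence = [1, 2, 3, 4, 5, -6, -7, -8, -9, -10]
--
--     ::
--
--         >>> sequencetools.negate_sequence_elements_at_indices(sequence, [0, 1, 2])
--         [-1, -2, -3, 4, 5, -6, -7, -8, -9, -10]
--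
--     Returns newly constructed list.
--     '''
--
--     result = []
--
--     for i, element in enumerate(sequence):
--         if (i in indices):
--             result.append(-abs(element))
--         else:
--             result.append(element)
--
--     return result
-- ===== SOURCE B (Python) =====
-- def negate_absolute_value_of_sequence_elements_at_indices(sequence, indices):
--     result = list(sequence)
--     n = len(result)
--     for i in indices:
--         if 0 <= i < n:
--             result[i] = -abs(result[i])
--     return result
-- ===== Notes on version B (the rewrite author's own statement) =====
-- stated objective: faster
-- what changed: B copies the sequence once and iterates over the indices, updating only the selected positions in place (with a bounds guard matching A's membership semantics), instead of scanning the whole sequence and testing membership of each position in the indices list.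
import Mathlib
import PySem

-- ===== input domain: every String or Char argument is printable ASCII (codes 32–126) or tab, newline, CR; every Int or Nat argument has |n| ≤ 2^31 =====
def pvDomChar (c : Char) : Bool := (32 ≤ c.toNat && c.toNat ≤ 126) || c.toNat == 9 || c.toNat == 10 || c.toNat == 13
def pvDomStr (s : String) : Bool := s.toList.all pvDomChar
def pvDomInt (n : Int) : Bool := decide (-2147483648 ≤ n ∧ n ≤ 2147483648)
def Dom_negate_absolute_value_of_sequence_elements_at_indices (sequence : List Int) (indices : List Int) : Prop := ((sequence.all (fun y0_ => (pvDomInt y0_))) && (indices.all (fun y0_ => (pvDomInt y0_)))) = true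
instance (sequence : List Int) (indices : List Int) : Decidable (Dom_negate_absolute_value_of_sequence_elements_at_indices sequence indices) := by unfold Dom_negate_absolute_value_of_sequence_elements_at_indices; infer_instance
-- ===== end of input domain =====

-- B copies the sequence once and walks the indices, negating only the selected positions,
-- instead of scanning the sequence and testing membership of each position (objective: faster).


-- ===== PORT A =====
-- for i, element in enumerate(sequence): append -abs(element) if i in indices else element
def negate_absolute_value_of_sequence_elements_at_indices (sequence : List Int) (indices : List Int) : List Int :=
  (PySem.List.enumerate sequence).foldl
    (fun result p => if p.1 ∈ indices then result ++ [-|p.2|] else result ++ [p.2]) []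

-- ===== PORT B =====
-- result = list(sequence); for i in indices: if 0 <= i < n: result[i] = -abs(result[i])
def negate_absolute_value_of_sequence_elements_at_indices_alt (sequence : List Int) (indices : List Int) : List Int :=
  indices.foldl
    (fun result i =>
      if 0 ≤ i ∧ i < (sequence.length : Int) then
        result.set i.toNat (-|result.getD i.toNat 0|)
      else result)
    sequence

-- ===== PRECONDITION & SPEC =====
def Spec_negate_absolute_value_of_sequence_elements_at_indices (sequence : List Int) (indices : List Int) (out : List Int) : Prop := out = negate_absolute_value_of_sequence_elements_at_indices_alt sequence indices
instance (sequence : List Int) (indices : List Int) (out : List Int) : Decidable (Spec_negate_absolute_value_of_sequence_elements_at_indices sequence indices out) := by unfold Spec_negate_absolute_value_of_sequence_elements_at_indices; infer_instance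

-- ===== CLAIM (what is proved, stated in full; the proofs are below) =====
def Claim_equal_negate_absolute_value_of_sequence_elements_at_indices : Prop := ∀ (sequence : List Int) (indices : List Int), Dom_negate_absolute_value_of_sequence_elements_at_indices sequence indices → Spec_negate_absolute_value_of_sequence_elements_at_indices sequence indices (negate_absolute_value_of_sequence_elements_at_indices sequence indices)

-- ===== LEMMAS AND PROOFS =====

-- A's loop is an append-map over the enumeration.
lemma portA_eq_map (s idxs : List Int) :
    negate_absolute_value_of_sequence_elements_at_indices s idxs =
      (PySem.List.enumerate s).map (fun p => if p.1 ∈ idxs then -|p.2| else p.2) := by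
  unfold negate_absolute_value_of_sequence_elements_at_indices
  have h : (fun (result : List Int) (p : Int × Int) =>
      if p.1 ∈ idxs then result ++ [-|p.2|] else result ++ [p.2]) =
      (fun result p => result ++ [if p.1 ∈ idxs then -|p.2| else p.2]) := by
    funext result p; split <;> rfl
  rw [h, PySem.List.foldl_append_singleton_eq_map]
  simp

-- negating the absolute value is idempotent on entries already negated
lemma neg_abs_entry (x y : Int) (h : y = x ∨ y = -|x|) : -|y| = -|x| := by
  rcases h with h | h <;> subst h <;> simp [abs_abs]

-- B's fold preserves length.
lemma foldB_length (s : List Int) (idxs : List Int) (acc : List Int) :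
    (idxs.foldl
      (fun result i =>
        if 0 ≤ i ∧ i < (s.length : Int) then
          result.set i.toNat (-|result.getD i.toNat 0|)
        else result) acc).length = acc.length := by
  induction idxs generalizing acc with
  | nil => rfl
  | cons i t ih =>
      simp only [List.foldl_cons]
      split
      · exact (ih _).trans (by simp)
      · exact ih acc

-- Invariant: on an accumulator whose entries are each either the original element or its
-- negated absolute value, the fold negates exactly the positions hit by the index list.
lemma foldB_getElem? (s idxs : List Int) (acc : List Int)
    (hlen : acc.length = s.length)
    (hacc : ∀ j (hj : j < s.length),
      acc[j]? = some (s[j]) ∨ acc[j]? = some (-|s[j]|)) :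
    ∀ j (hj : j < s.length),
      (idxs.foldl
        (fun result i =>
          if 0 ≤ i ∧ i < (s.length : Int) then
            result.set i.toNat (-|result.getD i.toNat 0|)
          else result) acc)[j]? =
        if (j : Int) ∈ idxs then some (-|s[j]|) else acc[j]? := by
  induction idxs generalizing acc with
  | nil => intro j hj; simp
  | cons i t ih =>
      intro j hj
      simp only [List.foldl_cons]
      set acc' : List Int :=
        (if 0 ≤ i ∧ i < (s.length : Int) then
          acc.set i.toNat (-|acc.getD i.toNat 0|) else acc) with hacc'def
      have hlen' : acc'.length = s.length := by
        rw [hacc'def]; split <;> simp [hlen]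
      have hset : ∀ (hg : 0 ≤ i ∧ i < (s.length : Int)) (hk : i.toNat < s.length),
          acc'[i.toNat]? = some (-|s[i.toNat]|) := by
        intro hg hk
        have hlt : i.toNat < acc.length := by omega
        rw [hacc'def, if_pos hg, List.getElem?_set_self hlt]
        have hv : acc.getD i.toNat 0 = s[i.toNat] ∨ acc.getD i.toNat 0 = -|s[i.toNat]| := by
          rcases hacc i.toNat hk with h1 | h1
          · left; rw [List.getD_eq_getElem?_getD, h1]; rfl
          · right; rw [List.getD_eq_getElem?_getD, h1]; rfl
        rw [neg_abs_entry _ _ hv]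
      have hacc'j : ∀ k (hk : k < s.length),
          acc'[k]? = some (s[k]) ∨ acc'[k]? = some (-|s[k]|) := by
        intro k hk
        by_cases hg : 0 ≤ i ∧ i < (s.length : Int)
        · by_cases hik : i.toNat = k
          · subst hik; exact Or.inr (hset hg (by omega))
          · rw [hacc'def, if_pos hg, List.getElem?_set_ne hik]
            exact hacc k hk
        · rw [hacc'def, if_neg hg]; exact hacc k hk
      rw [ih acc' hlen' hacc'j j hj]
      by_cases hmt : (j : Int) ∈ t
      · simp [hmt]
      · by_cases hij : i = (j : Int)
        · have hg : 0 ≤ i ∧ i < (s.length : Int) := by constructor <;> omega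
          have hjmem : (j : Int) ∈ i :: t := by rw [← hij]; exact List.mem_cons_self ..
          rw [if_neg hmt, if_pos hjmem]
          have hiN : i.toNat = j := by omega
          subst hiN
          exact hset hg (by omega)
        · have hnm : (j : Int) ∉ i :: t := by
            intro hm
            rcases List.mem_cons.mp hm with h | h
            · exact hij h.symm
            · exact hmt h
          rw [if_neg hmt, if_neg hnm, hacc'def]
          split
          · rename_i hg
            have hik : i.toNat ≠ j := by omega
            rw [List.getElem?_set_ne hik]
          · rfl

-- ===== VERDICT (by name: the statement is the Claim_ definition above) =====
theorem negate_absolute_value_of_sequence_elements_at_indices_spec : Claim_equal_negate_absolute_value_of_sequence_elements_at_indices := by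
  intro s idxs _
  show _ = _
  have hlenB : (negate_absolute_value_of_sequence_elements_at_indices_alt s idxs).length = s.length :=
    foldB_length s idxs s
  have hlenA : (negate_absolute_value_of_sequence_elements_at_indices s idxs).length = s.length := by
    rw [portA_eq_map]; simp [PySem.List.length_enumerate]
  apply List.ext_getElem (by omega)
  intro j hj1 hj2
  have hjs : j < s.length := by omega
  have hA : (negate_absolute_value_of_sequence_elements_at_indices s idxs)[j]? =
      some (if (j : Int) ∈ idxs then -|s[j]| else s[j]) := by
    rw [portA_eq_map, List.getElem?_map, PySem.List.getElem?_enumerate,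
      List.getElem?_eq_getElem hjs]
    simp
  have hB : (negate_absolute_value_of_sequence_elements_at_indices_alt s idxs)[j]? =
      if (j : Int) ∈ idxs then some (-|s[j]|) else s[j]? :=
    foldB_getElem? s idxs s rfl
      (fun k hk => Or.inl (List.getElem?_eq_getElem hk)) j hjs
  rw [List.getElem?_eq_getElem hj1] at hA
  rw [List.getElem?_eq_getElem hj2, List.getElem?_eq_getElem hjs] at hB
  simp only [Option.some.injEq] at hA
  rw [hA]
  by_cases hm : (j : Int) ∈ idxs
  · rw [if_pos hm] at hB ⊢
    simp only [Option.some.injEq] at hB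
    omega
  · rw [if_neg hm] at hB ⊢
    simp only [Option.some.injEq] at hB
    omega
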